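-- pv_equiv track=rewrite | github.com/seoul-ssafy-class-2-studyclub/Eunsung | D3/7675 통역사 성경이.py | check
-- ===== SOURCE A (Python) =====
-- def check(string):
--     for letter_num in range(len(string)):
--         if letter_num == 0:
--             if not('A'<=string[letter_num]<='Z'):
--                 return False
--         else:
--             if not('a'<=string[letter_num]<='z'):
--                 return False
--     return True
-- ===== SOURCE B (Python) =====
-- import re
--
-- _NAME_RE = re.compile(r'[A-Z][a-z]*')
--
-- def check(string):
--     if string == '':
--         return True
--     return _NAME_RE.fullmatch(string) is not None
-- ===== Notes on version B (the rewrite author's own statement) =====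
-- stated objective: idiomatic
-- what changed: Replaces the explicit index-branching loop with a precompiled regex fullmatch against [A-Z][a-z]* (empty string allowed explicitly, as A accepts it), i.e. a finite-automaton match instead of manual index iteration.
import Mathlib
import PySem

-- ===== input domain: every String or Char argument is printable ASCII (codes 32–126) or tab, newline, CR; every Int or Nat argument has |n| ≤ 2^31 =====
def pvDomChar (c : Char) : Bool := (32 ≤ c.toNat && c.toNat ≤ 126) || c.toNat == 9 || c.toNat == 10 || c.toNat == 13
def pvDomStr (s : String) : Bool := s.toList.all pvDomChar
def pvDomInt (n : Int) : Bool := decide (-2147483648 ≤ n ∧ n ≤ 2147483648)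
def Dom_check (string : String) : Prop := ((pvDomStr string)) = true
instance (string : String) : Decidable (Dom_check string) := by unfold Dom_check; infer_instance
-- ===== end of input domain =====

-- B replaces A's index-branching loop with a regex-style match: first char in [A-Z], rest all in [a-z] (empty string accepted, as in A).

-- ===== PORT A =====
-- the for-loop over range(len(string)) with early returns, as structural recursion on the index list
def checkLoop (cs : List Char) : List Int → Bool
  | [] => true
  | i :: rest =>
    let c := PySem.List.pyGetD cs i ' '
    if i = 0 then
      if ¬ ('A' ≤ c ∧ c ≤ 'Z') then false else checkLoop cs rest
    else
      if ¬ ('a' ≤ c ∧ c ≤ 'z') then false else checkLoop cs rest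

def check (string : String) : Bool :=
  checkLoop string.toList (PySem.List.pyRange 0 (string.toList.length : Int) 1)

-- ===== PORT B =====
-- fullmatch of [A-Z][a-z]* : head char uppercase, every tail char lowercase; '' accepted explicitly
def check_alt (string : String) : Bool :=
  if string = "" then true
  else
    match string.toList with
    | [] => true
    | c :: rest => ('A' ≤ c && c ≤ 'Z') && rest.all (fun d => 'a' ≤ d && d ≤ 'z')

-- ===== PRECONDITION & SPEC =====
def Spec_check (string : String) (out : Bool) : Prop := out = check_alt string
instance (string : String) (out : Bool) : Decidable (Spec_check string out) := by unfold Spec_check; infer_instance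

-- ===== CLAIM (what is proved, stated in full; the proofs are below) =====
def Claim_equal_check : Prop := ∀ (string : String), Dom_check string → Spec_check string (check string)

-- ===== LEMMAS AND PROOFS =====

-- the loop, on indices that are all nonzero, is exactly an 'all lowercase' test on those indices
theorem checkLoop_no_zero (cs : List Char) (idx : List Int) (h : ∀ i ∈ idx, i ≠ 0) :
    checkLoop cs idx
      = idx.all (fun i => decide ('a' ≤ PySem.List.pyGetD cs i ' ' ∧ PySem.List.pyGetD cs i ' ' ≤ 'z')) := by
  induction idx with
  | nil => rfl
  | cons i rest ih =>
    have hi : i ≠ 0 := h i (by simp)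
    simp only [checkLoop, if_neg hi, List.all_cons]
    by_cases hc : 'a' ≤ PySem.List.pyGetD cs i ' ' ∧ PySem.List.pyGetD cs i ' ' ≤ 'z'
    · simp [hc, ih (fun j hj => h j (List.mem_cons_of_mem _ hj))]
    · simp [hc]

-- ===== VERDICT (by name: the statement is the Claim_ definition above) =====
theorem check_spec : Claim_equal_check := by
  intro s _
  unfold Spec_check check check_alt
  rcases hcs : s.toList with _ | ⟨c, rest⟩
  · have hs : s = "" := by
      rwa [String.toList_eq_nil_iff] at hcs
    simp [hs, PySem.List.pyRange_one_eq_nil, checkLoop]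
  · have hne : s ≠ "" := by
      intro h; rw [h] at hcs; simp at hcs
    have hlen : (0 : Int) < ((c :: rest).length : Int) := by
      simp
    rw [if_neg hne]
    rw [PySem.List.pyRange_one_cons hlen]
    simp only [checkLoop]
    have h0 : PySem.List.pyGetD (c :: rest) 0 ' ' = c := by
      simp [PySem.List.pyGetD, PySem.List.pyGet?, PySem.List.pyIdx?]
    rw [if_pos trivial, h0]
    by_cases hc : 'A' ≤ c ∧ c ≤ 'Z'
    · rw [if_neg (by simp [hc.1, hc.2])]
      have hnz : ∀ i ∈ PySem.List.pyRange (0+1) ((c :: rest).length : Int) 1, i ≠ 0 := by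
        intro i hi
        have := (PySem.List.mem_pyRange_one).mp hi
        omega
      rw [checkLoop_no_zero _ _ hnz]
      have hmap : (PySem.List.pyRange (0+1) ((c :: rest).length : Int) 1).map
          (fun j => PySem.List.pyGetD (c :: rest) j ' ') = (c :: rest).drop 1 := by
        simpa using PySem.List.map_pyGetD_pyRange (c :: rest) ' ' (a := 1) (by norm_num)
      have := congrArg (List.all · (fun d => decide ('a' ≤ d ∧ d ≤ 'z'))) hmap
      simp only [List.all_map, Function.comp_def] at this
      rw [this]
      simp [hc.1, hc.2]
    · rw [if_pos hc]
      simp [hc]
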